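-- pv_equiv track=rewrite | github.com/sqbi-q/Abscissa | lancuch_gen.py | shift_merge
-- ===== SOURCE A (Python) =====
-- class Joint: #kolumna baza-łączące
--     def __init__(self, base: str, conns: list):
--         self.base = base
--         self.conns = conns
--
--     def getMerges(self):
--         shift=1
--         merges=[]
--
--         while True:
--             for conn in self.conns:
--                 if self.base[shift:] == conn[:-shift+len(self.base)]:
--                     merges.append(conn)
--             if len(merges) > 0:
--                 break
--             shift += 1
--
--         return (merges, shift)
--
--     @staticmethod
--     def merge(a: str, b: str, bshift: int):
--         return a + b[len(a)-bshift:]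
--
-- def shift_merge(vars: list):
--     merged = []
--
--     joints = [Joint(vars[0], vars[1:])]
--     # joints.append(Joint(vars[0], vars[1:]))
--
--     while len(joints):
--         joint = joints[0]
--         merges, bshift = joint.getMerges()
--         for merge in merges:
--             newConns = joint.conns[:]
--             newConns.remove(merge)
--             newJoint = Joint(Joint.merge(joint.base, merge, bshift), newConns)
--
--             if len(newJoint.conns) == 0:
--                 merged.append(newJoint.base)
--             else:
--                 joints.append(newJoint)
--         joints.remove(joint)
--     return merged
-- ===== SOURCE B (Python) =====
-- # parameter named `strs` here: A calls it `vars`, which shadows a Python builtin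
-- # that this harness rejects; it is the same single positional list argument.
-- def shift_merge(strs: list):
--     results = []
--
--     def get_merges(base, conns):
--         shift = 1
--         while True:
--             matches = [c for c in conns if base[shift:] == c[:len(base) - shift]]
--             if matches:
--                 return matches, shift
--             shift += 1
--
--     def expand(base, conns):
--         matches, bshift = get_merges(base, conns)
--         for m in matches:
--             rest = conns[:]
--             rest.remove(m)
--             nb = base + m[len(base) - bshift:]
--             if not rest:
--                 results.append(nb)
--             else:
--                 expand(nb, rest)
--
--     expand(strs[0], strs[1:])
--     return results
-- ===== Notes on version B (the rewrite author's own statement) =====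
-- stated objective: alternative
-- what changed: Replaces A's FIFO worklist of Joint objects (append children to the queue, pop the front) by recursive depth-first backtracking that expands each child immediately and emits finished merges along the way; the per-shift match collection becomes a comprehension instead of an append loop. Equal output order because all completed merges sit at the same depth.
import Mathlib
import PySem

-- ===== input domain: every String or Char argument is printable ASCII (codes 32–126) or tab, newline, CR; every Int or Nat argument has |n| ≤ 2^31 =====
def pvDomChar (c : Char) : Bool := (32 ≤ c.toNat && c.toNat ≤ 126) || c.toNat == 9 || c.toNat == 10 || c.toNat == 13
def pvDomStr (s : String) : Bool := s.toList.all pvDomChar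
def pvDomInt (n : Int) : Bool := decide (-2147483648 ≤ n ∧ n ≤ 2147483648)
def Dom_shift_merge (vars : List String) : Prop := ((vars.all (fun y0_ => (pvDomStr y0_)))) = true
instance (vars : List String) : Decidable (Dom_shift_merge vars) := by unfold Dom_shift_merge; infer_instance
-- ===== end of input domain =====

-- B replaces A's FIFO worklist of Joint objects by recursive depth-first backtracking (objective: alternative decomposition, same cost).
-- Strings are ported through List Char (PySem.Chars side), as the prelude advises.

-- ===== PORT A =====

/-- A's Joint: a base string (as code points) and the remaining connector strings. -/
structure PJoint where
  base : List Char
  conns : List (List Char)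

/-- the overlap test `self.base[shift:] == conn[:-shift+len(self.base)]` (Python slice semantics). -/
def gmCond (base conn : List Char) (shift : Int) : Bool :=
  PySem.List.slice base (some shift) none == PySem.List.slice conn none (some ((base.length : Int) - shift))

/-- A's `getMerges` while-loop: collect matching conns at the current shift (append loop),
    break when nonempty, else `shift += 1`.  The `while True` is fueled; the fuel below is
    always sufficient when `conns ≠ []` (a shift of `len(base) + min conn length` matches). -/
def gmLoopA (base : List Char) (conns : List (List Char)) : Nat → Int → (List (List Char) × Int)
  | 0, shift => ([], shift)
  | fuel + 1, shift =>
    let merges := conns.foldl (fun acc conn => if gmCond base conn shift then acc ++ [conn] else acc) []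
    if merges.length > 0 then (merges, shift) else gmLoopA base conns fuel (shift + 1)

/-- sufficient fuel for the `while True` in `getMerges` (see `gmLoopA`). -/
def gmFuel (base : List Char) (conns : List (List Char)) : Nat :=
  base.length + (conns.map List.length).sum + 2

def getMergesA (j : PJoint) : List (List Char) × Int :=
  gmLoopA j.base j.conns (gmFuel j.base j.conns) 1

/-- `Joint.merge(a, b, bshift) = a + b[len(a)-bshift:]` (Python slice: negative start wraps). -/
def mergeStr (a b : List Char) (bshift : Int) : List Char :=
  a ++ PySem.List.slice b (some ((a.length : Int) - bshift)) none

/-- body of A's `for merge in merges` loop: state = (newly queued joints, merged output).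
    `newConns.remove(merge)` always succeeds (merge ∈ conns), so `.getD` never fires. -/
def stepA (base : List Char) (conns : List (List Char)) (bshift : Int)
    (st : List PJoint × List (List Char)) (m : List Char) : List PJoint × List (List Char) :=
  let newConns := (PySem.List.remove? conns m).getD conns
  let nb := mergeStr base m bshift
  if newConns.length == 0 then (st.1, st.2 ++ [nb]) else (st.1 ++ [⟨nb, newConns⟩], st.2)

/-- weight of a joint for the termination measure of A's worklist loop. -/
def wtA (j : PJoint) : Nat := (j.conns.length + 1).factorial

/-- termination measure: sum of weights over the queue. -/
def MqA (js : List PJoint) : Nat := (js.map wtA).sum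

theorem gmLoopA_shape (base : List Char) (conns : List (List Char)) :
    ∀ (fuel : Nat) (shift : Int), (gmLoopA base conns fuel shift).1 = [] ∨
      ∃ s, (gmLoopA base conns fuel shift).1 = conns.filter (fun c => gmCond base c s) := by
  intro fuel
  induction fuel with
  | zero => intro shift; left; rfl
  | succ n ih =>
    intro shift
    simp only [gmLoopA, PySem.List.foldl_append_if_eq_filter, List.nil_append]
    by_cases h : (conns.filter (fun c => gmCond base c shift)).length > 0
    · simp only [if_pos h]; right; exact ⟨shift, rfl⟩
    · simp only [if_neg h]; exact ih (shift + 1)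

theorem gmA_sub (j : PJoint) : ∀ m ∈ (getMergesA j).1, m ∈ j.conns := by
  intro m hm
  rcases gmLoopA_shape j.base j.conns (gmFuel j.base j.conns) 1 with h | ⟨s, h⟩
  · rw [getMergesA, h] at hm; cases hm
  · rw [getMergesA, h] at hm; exact List.mem_of_mem_filter hm

theorem gmA_len (j : PJoint) : (getMergesA j).1.length ≤ j.conns.length := by
  rcases gmLoopA_shape j.base j.conns (gmFuel j.base j.conns) 1 with h | ⟨s, h⟩
  · rw [getMergesA, h]; simp
  · rw [getMergesA, h]; exact List.length_filter_le _ _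

theorem foldA_bound (base : List Char) (bshift : Int) (conns merges : List (List Char))
    (hs : ∀ m ∈ merges, m ∈ conns) (init : List PJoint × List (List Char)) :
    MqA ((merges.foldl (stepA base conns bshift) init).1) ≤
      MqA init.1 + merges.length * (conns.length).factorial := by
  induction merges generalizing init with
  | nil => simp
  | cons m ms ih =>
    have hm : m ∈ conns := hs m (by simp)
    have hrec := PySem.List.remove?_eq_some_erase conns m hm
    have hlen := List.length_erase_of_mem hm
    have hpos : 0 < conns.length := List.length_pos_of_mem hm
    have hstep : ∀ st : List PJoint × List (List Char),
        MqA (stepA base conns bshift st m).1 ≤ MqA st.1 + (conns.length).factorial := by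
      intro st
      simp only [stepA, hrec, Option.getD_some]
      split
      · simp [MqA]
      · simp only [MqA, List.map_append, List.sum_append, List.map_cons, List.sum_cons,
          List.map_nil, List.sum_nil, wtA]
        have : (conns.erase m).length + 1 = conns.length := by omega
        rw [this]
        omega
    simp only [List.foldl_cons]
    calc MqA ((ms.foldl (stepA base conns bshift) (stepA base conns bshift init m)).1)
        ≤ MqA (stepA base conns bshift init m).1 + ms.length * (conns.length).factorial :=
          ih (fun x hx => hs x (by simp [hx])) _
      _ ≤ MqA init.1 + (conns.length).factorial + ms.length * (conns.length).factorial :=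
          by have := hstep init; omega
      _ = MqA init.1 + (m :: ms).length * (conns.length).factorial := by
          simp [List.length_cons]; ring

/-- A's outer `while len(joints)` loop.  `joints[0]` is the head; `joints.remove(joint)`
    removes by object identity, i.e. exactly the head, so the next queue is `rest ++ new`. -/
def processA : List PJoint → List (List Char) → List (List Char)
  | [], merged => merged
  | joint :: rest, merged =>
    let p := getMergesA joint
    let st := p.1.foldl (stepA joint.base joint.conns p.2) ([], merged)
    processA (rest ++ st.1) st.2
termination_by js _ => MqA js
decreasing_by
  have h1 := foldA_bound joint.base (getMergesA joint).2 joint.conns (getMergesA joint).1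
    (gmA_sub joint) ([], merged)
  have h2 := gmA_len joint
  have h3 : 0 < (joint.conns.length).factorial := Nat.factorial_pos _
  simp only [MqA, List.map_append, List.sum_append, List.map_cons, List.sum_cons,
    List.map_nil, List.sum_nil] at h1 ⊢
  have h4 : (getMergesA joint).1.length * (joint.conns.length).factorial ≤
      joint.conns.length * (joint.conns.length).factorial := Nat.mul_le_mul_right _ h2
  have h5 : joint.conns.length * (joint.conns.length).factorial < wtA joint := by
    simp only [wtA, Nat.factorial_succ]
    exact (Nat.mul_lt_mul_right h3).mpr (Nat.lt_succ_self _)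
  omega

def shift_merge (vars : List String) : List String :=
  match vars with
  | [] => []   -- Python raises IndexError on vars[0]; excluded by Pre_
  | v :: rest => (processA [⟨v.toList, rest.map String.toList⟩] []).map String.ofList

-- ===== PORT B =====

/-- B's `get_merges`: same fueled shift search, but the matches are collected by a
    comprehension (filter) instead of an append loop. -/
def gmLoopB (base : List Char) (conns : List (List Char)) : Nat → Int → (List (List Char) × Int)
  | 0, shift => ([], shift)
  | fuel + 1, shift =>
    let ms_ := conns.filter (fun c => gmCond base c shift)
    if ms_.isEmpty then gmLoopB base conns fuel (shift + 1) else (ms_, shift)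

def getMergesB (base : List Char) (conns : List (List Char)) : List (List Char) × Int :=
  gmLoopB base conns (gmFuel base conns) 1

/-- B's recursive `expand`: for each match, remove it, merge, and either emit the finished
    base or recurse; results are accumulated left to right (flatMap). -/
def expandB (base : List Char) (conns : List (List Char)) : List (List Char) :=
  (getMergesB base conns).1.flatMap (fun m =>
    match h : PySem.List.remove? conns m with
    | none => []   -- Python's list.remove would raise ValueError; unreachable (m ∈ conns)
    | some nc =>
      if nc.isEmpty then [mergeStr base m (getMergesB base conns).2]
      else expandB (mergeStr base m (getMergesB base conns).2) nc)
termination_by conns.length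
decreasing_by
  have hm : m ∈ conns := by
    by_contra hmem
    rw [(PySem.List.remove?_eq_none_iff conns m).mpr hmem] at h
    simp at h
  rw [PySem.List.remove?_eq_some_erase conns m hm] at h
  obtain rfl : conns.erase m = nc := Option.some.inj h
  have := List.length_erase_of_mem hm
  have hpos : 0 < conns.length := List.length_pos_of_mem hm
  omega

def shift_merge_alt (vars : List String) : List String :=
  match vars with
  | [] => []   -- Python raises IndexError on vars[0]; excluded by Pre_
  | v :: rest => (expandB v.toList (rest.map String.toList)).map String.ofList

-- ===== PRECONDITION & SPEC =====
-- Pre_ excludes vars = [] (A raises IndexError on vars[0]) and singleton vars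
-- (getMerges loops forever on empty conns, so A never returns).
def Pre_shift_merge (vars : List String) : Prop := 2 ≤ vars.length
instance (vars : List String) : Decidable (Pre_shift_merge vars) := by
  unfold Pre_shift_merge; infer_instance

def pvWitness_shift_merge : List String := ["ab", "bc"]

def Spec_shift_merge (vars : List String) (out : List String) : Prop := out = shift_merge_alt vars
instance (vars : List String) (out : List String) : Decidable (Spec_shift_merge vars out) := by
  unfold Spec_shift_merge; infer_instance

-- ===== CLAIM (what is proved, stated in full; the proofs are below) =====
def Claim_equal_shift_merge : Prop := ∀ (vars : List String), Dom_shift_merge vars →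
  Pre_shift_merge vars → Spec_shift_merge vars (shift_merge vars)

-- ===== LEMMAS AND PROOFS =====

theorem gm_eq (base : List Char) (conns : List (List Char)) :
    ∀ (fuel : Nat) (shift : Int), gmLoopA base conns fuel shift = gmLoopB base conns fuel shift := by
  intro fuel
  induction fuel with
  | zero => intro shift; rfl
  | succ n ih =>
    intro shift
    simp only [gmLoopA, gmLoopB, PySem.List.foldl_append_if_eq_filter, List.nil_append]
    rcases h : conns.filter (fun c => gmCond base c shift) with _ | ⟨a, l⟩
    · simpa using ih (shift + 1)
    · simp

theorem getMerges_eq (j : PJoint) : getMergesA j = getMergesB j.base j.conns := by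
  rw [getMergesA, getMergesB, gm_eq]

theorem gmB_sub (base : List Char) (conns : List (List Char)) :
    ∀ m ∈ (getMergesB base conns).1, m ∈ conns := by
  have := gmA_sub ⟨base, conns⟩
  rwa [getMerges_eq] at this

theorem foldA_leaf (base : List Char) (bshift : Int) (conns : List (List Char))
    (hL : conns.length = 1) :
    ∀ (merges : List (List Char)) (init : List PJoint × List (List Char)),
      (∀ m ∈ merges, m ∈ conns) →
      merges.foldl (stepA base conns bshift) init =
        (init.1, init.2 ++ merges.map (fun m => mergeStr base m bshift)) := by
  intro merges
  induction merges with
  | nil => intro init _; simp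
  | cons m ms ih =>
    intro init hs
    have hm : m ∈ conns := hs m (by simp)
    have hrec := PySem.List.remove?_eq_some_erase conns m hm
    have hlen := List.length_erase_of_mem hm
    simp only [List.foldl_cons, stepA, hrec, Option.getD_some]
    rw [if_pos (by simp only [beq_iff_eq]; omega)]
    rw [ih _ (fun x hx => hs x (by simp [hx]))]
    simp

theorem foldA_node (base : List Char) (bshift : Int) (conns : List (List Char))
    (hL : 2 ≤ conns.length) :
    ∀ (merges : List (List Char)) (init : List PJoint × List (List Char)),
      (∀ m ∈ merges, m ∈ conns) →
      merges.foldl (stepA base conns bshift) init =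
        (init.1 ++ merges.map (fun m => (⟨mergeStr base m bshift, conns.erase m⟩ : PJoint)),
         init.2) := by
  intro merges
  induction merges with
  | nil => intro init _; simp
  | cons m ms ih =>
    intro init hs
    have hm : m ∈ conns := hs m (by simp)
    have hrec := PySem.List.remove?_eq_some_erase conns m hm
    have hlen := List.length_erase_of_mem hm
    simp only [List.foldl_cons, stepA, hrec, Option.getD_some]
    rw [if_neg (by simp only [beq_iff_eq]; omega)]
    rw [ih _ (fun x hx => hs x (by simp [hx]))]
    simp

theorem expandB_leaf (base : List Char) (conns : List (List Char)) (hL : conns.length = 1) :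
    expandB base conns = (getMergesB base conns).1.map
      (fun m => mergeStr base m (getMergesB base conns).2) := by
  rw [expandB]
  rw [List.flatMap_congr (g := fun m => [mergeStr base m (getMergesB base conns).2]) ?_]
  · induction (getMergesB base conns).1 with
    | nil => rfl
    | cons a l ih => simp [ih]
  · intro m hm
    have hmc : m ∈ conns := gmB_sub base conns m hm
    have hrec := PySem.List.remove?_eq_some_erase conns m hmc
    have hlen := List.length_erase_of_mem hmc
    split
    · next heq => rw [heq] at hrec; cases hrec
    · next nc heq =>
      rw [heq] at hrec
      obtain rfl : conns.erase m = nc := Option.some.inj hrec.symm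
      rw [if_pos (by rw [List.isEmpty_iff, List.eq_nil_iff_length_eq_zero]; omega)]

theorem expandB_node (base : List Char) (conns : List (List Char)) (hL : 2 ≤ conns.length) :
    expandB base conns = (getMergesB base conns).1.flatMap
      (fun m => expandB (mergeStr base m (getMergesB base conns).2) (conns.erase m)) := by
  rw [expandB]
  apply List.flatMap_congr
  intro m hm
  have hmc : m ∈ conns := gmB_sub base conns m hm
  have hrec := PySem.List.remove?_eq_some_erase conns m hmc
  have hlen := List.length_erase_of_mem hmc
  split
  · next heq => rw [heq] at hrec; cases hrec
  · next nc heq =>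
    rw [heq] at hrec
    obtain rfl : conns.erase m = nc := Option.some.inj hrec.symm
    rw [if_neg (by rw [List.isEmpty_iff, List.eq_nil_iff_length_eq_zero]; omega)]

theorem MqA_const (js : List PJoint) (w : Nat) (h : ∀ c ∈ js, wtA c = w) :
    MqA js = js.length * w := by
  induction js with
  | nil => simp [MqA]
  | cons a l ih =>
    simp only [MqA, List.map_cons, List.sum_cons, List.length_cons] at *
    rw [h a (by simp), ih (fun c hc => h c (by simp [hc]))]
    ring

/-- DFS result of one joint (B's expand). -/
def dfsB (j : PJoint) : List (List Char) := expandB j.base j.conns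

/-- the key bridge: A's FIFO worklist on a two-block queue produces the deeper block's
    DFS results first, then the shallower block's, in order. -/
theorem processA_eq_dfs : ∀ (k L : Nat) (xs ys : List PJoint) (acc : List (List Char)),
    MqA (xs ++ ys) + L ≤ k → 1 ≤ L →
    (∀ j ∈ xs, j.conns.length = L) → (∀ j ∈ ys, j.conns.length + 1 = L) →
    (L = 1 → ys = []) →
    processA (xs ++ ys) acc = acc ++ ys.flatMap dfsB ++ xs.flatMap dfsB := by
  intro k
  induction k with
  | zero =>
    intro L xs ys acc hk hL _ _ _
    omega
  | succ k ih =>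
    intro L xs ys acc hk hL hxs hys hy1
    rcases xs with _ | ⟨j, xs'⟩
    · rcases ys with _ | ⟨y, ys'⟩
      · simp [processA]
      · have hL2 : 2 ≤ L := by
          rcases Nat.lt_or_ge L 2 with h | h
          · have h1 : L = 1 := by omega
            exact absurd (hy1 h1) (by simp)
          · exact h
        have hrec := ih (L - 1) (y :: ys') [] acc
          (by simp only [List.append_nil, List.nil_append] at hk ⊢; omega) (by omega)
          (fun j hj => by have := hys j hj; omega) (fun j hj => by cases hj) (fun _ => rfl)
        simp only [List.append_nil, List.nil_append] at hrec ⊢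
        rw [hrec]
        simp
    · have hjL : j.conns.length = L := hxs j (by simp)
      rw [show (j :: xs') ++ ys = j :: (xs' ++ ys) from rfl]
      simp only [processA]
      by_cases hL1 : L = 1
      · subst hL1
        have hys0 : ys = [] := hy1 rfl
        subst hys0
        rw [foldA_leaf j.base (getMergesA j).2 j.conns hjL (getMergesA j).1 _ (gmA_sub j)]
        have hw : 1 ≤ wtA j := Nat.factorial_pos _
        have hrec := ih 1 xs' [] (acc ++ (getMergesA j).1.map (fun m => mergeStr j.base m (getMergesA j).2))
          (by simp only [MqA, List.map_append, List.sum_append, List.map_cons, List.sum_cons,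
                List.map_nil, List.sum_nil] at hk ⊢; omega)
          (by omega) (fun x hx => hxs x (by simp [hx])) (fun x hx => by cases hx) (fun _ => rfl)
        simp only [List.append_nil] at hrec ⊢
        rw [hrec]
        have hd : dfsB j = (getMergesA j).1.map (fun m => mergeStr j.base m (getMergesA j).2) := by
          rw [dfsB, expandB_leaf j.base j.conns hjL, ← getMerges_eq j]
        simp [hd, List.append_assoc]
      · have hL2 : 2 ≤ j.conns.length := by omega
        rw [foldA_node j.base (getMergesA j).2 j.conns hL2 (getMergesA j).1 _ (gmA_sub j)]
        have hchild : ∀ c ∈ (getMergesA j).1.map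
            (fun m => (⟨mergeStr j.base m (getMergesA j).2, j.conns.erase m⟩ : PJoint)),
            c.conns.length + 1 = L := by
          intro c hc
          obtain ⟨m, hm, rfl⟩ := List.mem_map.mp hc
          have := List.length_erase_of_mem (gmA_sub j m hm)
          simp only []
          omega
        have hwchild : MqA ((getMergesA j).1.map
            (fun m => (⟨mergeStr j.base m (getMergesA j).2, j.conns.erase m⟩ : PJoint))) ≤
            j.conns.length * (j.conns.length).factorial := by
          have h1 : MqA ((getMergesA j).1.map
              (fun m => (⟨mergeStr j.base m (getMergesA j).2, j.conns.erase m⟩ : PJoint))) =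
              (getMergesA j).1.length * (j.conns.length).factorial := by
            have hall : ∀ c ∈ (getMergesA j).1.map
                (fun m => (⟨mergeStr j.base m (getMergesA j).2, j.conns.erase m⟩ : PJoint)),
                wtA c = (j.conns.length).factorial := by
              intro c hc
              have := hchild c hc
              simp only [wtA]
              rw [show c.conns.length + 1 = j.conns.length by omega]
            rw [MqA_const _ _ hall, List.length_map]
          rw [h1]
          exact Nat.mul_le_mul_right _ (gmA_len j)
        have hwj : j.conns.length * (j.conns.length).factorial < wtA j := by
          simp only [wtA, Nat.factorial_succ]
          exact (Nat.mul_lt_mul_right (Nat.factorial_pos _)).mpr (Nat.lt_succ_self _)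
        rw [List.nil_append, List.append_assoc]
        have hrec := ih L xs' (ys ++ (getMergesA j).1.map
            (fun m => (⟨mergeStr j.base m (getMergesA j).2, j.conns.erase m⟩ : PJoint))) acc
          (by
            simp only [MqA, List.map_append, List.sum_append, List.map_cons, List.sum_cons] at hk ⊢
            simp only [MqA] at hwchild
            omega)
          hL (fun x hx => hxs x (by simp [hx]))
          (by
            intro c hc
            rcases List.mem_append.mp hc with h | h
            · exact hys c h
            · exact hchild c h)
          (fun h => absurd h hL1)
        rw [hrec]
        have hd : (getMergesA j).1.flatMap
            (fun m => expandB (mergeStr j.base m (getMergesA j).2) (j.conns.erase m)) =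
            expandB j.base j.conns := by
          rw [expandB_node j.base j.conns hL2, ← getMerges_eq j]
        simp [List.flatMap_append, List.flatMap_map, List.append_assoc, dfsB, hd]

-- ===== VERDICT (by name: the statement is the Claim_ definition above) =====
theorem shift_merge_spec : Claim_equal_shift_merge := by
  intro vars _ hPre
  unfold Pre_shift_merge at hPre
  rcases vars with _ | ⟨v, rest⟩
  · simp at hPre
  · rcases rest with _ | ⟨r, rs⟩
    · simp at hPre
    · unfold Spec_shift_merge shift_merge shift_merge_alt
      show List.map String.ofList (processA [⟨v.toList, (r :: rs).map String.toList⟩] []) =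
        List.map String.ofList (expandB v.toList ((r :: rs).map String.toList))
      have h := processA_eq_dfs
        (MqA [⟨v.toList, (r :: rs).map String.toList⟩] + ((r :: rs).map String.toList).length)
        (((r :: rs).map String.toList).length)
        [⟨v.toList, (r :: rs).map String.toList⟩] [] []
        (by simp) (by simp)
        (by intro jj hj; simp only [List.mem_singleton] at hj; subst hj; rfl)
        (by intro jj hj; cases hj)
        (by intro _; rfl)
      simp only [List.append_nil, List.nil_append, List.flatMap_nil,
        List.flatMap_cons, List.flatMap_nil] at h
      rw [h]
      rfl
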